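-- pv_equiv track=rewrite | github.com/wherby/code | algorithm/mathA/组合数学/结论/二项式定理/所有子序列乘积和.py | getSubSeqProdSum
-- ===== SOURCE A (Python) =====
-- def getSubSeqProdSum(ls):
--     n = len(ls)
--     sm = 0
--     for i in range(0,1<<n):
--         acc = 1
--         for j in range(n):
--             if (1<<j)& i :
--                 acc *= ls[j]
--         sm += acc
--     return sm
-- ===== SOURCE B (Python) =====
-- def getSubSeqProdSum(ls):
--     # sum over all subsets of the product of elements = product of (1 + x)
--     prod = 1
--     for x in ls:
--         prod *= 1 + x
--     return prod
-- ===== Notes on version B (the rewrite author's own statement) =====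
-- stated objective: faster
-- what changed: Replaces enumeration of all 2^n subsets (with an inner product loop per subset) by the closed-form distributive identity: the sum of subset products equals the product of (1 + x) over the list, computed in one pass.
import Mathlib
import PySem

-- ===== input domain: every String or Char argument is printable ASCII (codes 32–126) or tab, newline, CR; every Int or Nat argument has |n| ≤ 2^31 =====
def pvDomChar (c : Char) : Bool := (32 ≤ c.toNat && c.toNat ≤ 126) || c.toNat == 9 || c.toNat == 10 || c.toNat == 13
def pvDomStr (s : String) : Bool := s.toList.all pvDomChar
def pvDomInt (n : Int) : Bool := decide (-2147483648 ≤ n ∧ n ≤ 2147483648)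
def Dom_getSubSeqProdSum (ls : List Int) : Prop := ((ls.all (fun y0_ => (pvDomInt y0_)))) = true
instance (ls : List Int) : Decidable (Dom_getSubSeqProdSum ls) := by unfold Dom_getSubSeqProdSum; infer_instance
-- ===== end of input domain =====

-- B replaces A's enumeration of all 2^n subsets by the one-pass identity ∏ (1 + x); faster (asymptotic).

-- ===== PORT A =====
-- '1 << n' and '(1 << j) & i' are ported by hand via Nat bit operations; exact here since
-- n = len(ls) ≥ 0 and the range counters i, j are ≥ 0.
def getSubSeqProdSum (ls : List Int) : Int :=
  let n : Int := PySem.List.len ls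
  (PySem.List.pyRange 0 ((1 <<< ls.length : Nat) : Int) 1).foldl (fun sm i =>
    sm + (PySem.List.pyRange 0 n 1).foldl (fun acc j =>
      if (1 <<< j.toNat) &&& i.toNat ≠ 0 then acc * PySem.List.pyGetD ls j 0 else acc) 1) 0

-- ===== PORT B =====
def getSubSeqProdSum_alt (ls : List Int) : Int :=
  ls.foldl (fun prod x => prod * (1 + x)) 1

-- ===== PRECONDITION & SPEC =====
def Spec_getSubSeqProdSum (ls : List Int) (out : Int) : Prop := out = getSubSeqProdSum_alt ls
instance (ls : List Int) (out : Int) : Decidable (Spec_getSubSeqProdSum ls out) := by unfold Spec_getSubSeqProdSum; infer_instance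

-- ===== CLAIM (what is proved, stated in full; the proofs are below) =====
def Claim_equal_getSubSeqProdSum : Prop := ∀ (ls : List Int), Dom_getSubSeqProdSum ls → Spec_getSubSeqProdSum ls (getSubSeqProdSum ls)

-- ===== LEMMAS AND PROOFS =====

-- the product A's inner loop computes for subset-mask k, in Nat-indexed form
def pvInner (ls : List Int) (k : Nat) : Int :=
  (List.range ls.length).foldl (fun acc j => if k.testBit j then acc * ls.getD j 0 else acc) 1

theorem pv_bit (k j : Nat) : ((1 <<< j &&& k) ≠ 0) = (k.testBit j = true) := by
  rw [Nat.one_shiftLeft, Nat.two_pow_and]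
  by_cases h : k.testBit j <;> simp [h]

-- multiplicative fold from an arbitrary start factors the start out
theorem pv_scale (l : List Nat) (p : Nat → Bool) (f : Nat → Int) (a : Int) :
    l.foldl (fun acc j => if p j then acc * f j else acc) a
      = a * l.foldl (fun acc j => if p j then acc * f j else acc) 1 := by
  induction l generalizing a with
  | nil => simp
  | cons x t ih =>
    simp only [List.foldl_cons]
    by_cases h : p x
    · simp only [h, if_true]
      rw [ih (a * f x), ih (1 * f x)]; ring
    · simp [h, ih a]

theorem pv_inner_cons (x : Int) (xs : List Int) (k : Nat) :
    pvInner (x :: xs) k = (if k.testBit 0 then x else 1) * pvInner xs (k / 2) := by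
  unfold pvInner
  rw [List.length_cons, List.range_succ_eq_map, List.foldl_cons, List.foldl_map]
  simp only [Nat.testBit_add_one, List.getD_cons_succ, List.getD_cons_zero]
  by_cases h : k.testBit 0
  · simp only [h, if_true, one_mul]
    exact pv_scale _ _ _ x
  · simp only [h, one_mul]
    exact pv_scale _ _ _ 1

-- sum over range(2*m) regrouped into even/odd pairs
theorem pv_sum_double (g : Nat → Int) (m : Nat) :
    ((List.range (2 * m)).map g).sum
      = ((List.range m).map (fun q => g (2 * q) + g (2 * q + 1))).sum := by
  induction m with
  | zero => simp
  | succ m ih =>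
    have h2 : 2 * (m + 1) = (2 * m + 1) + 1 := by omega
    rw [h2, List.range_succ, List.range_succ, List.range_succ]
    simp only [List.map_append, List.sum_append, List.map_cons, List.map_nil,
      List.sum_cons, List.sum_nil, ih]
    ring

theorem pv_sum_inner (ls : List Int) :
    ((List.range (2 ^ ls.length)).map (pvInner ls)).sum
      = (ls.map (fun x => 1 + x)).prod := by
  induction ls with
  | nil =>
    simp [pvInner]
  | cons x xs ih =>
    have h2 : 2 ^ (x :: xs).length = 2 * 2 ^ xs.length := by
      rw [List.length_cons]; ring
    rw [h2, pv_sum_double]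
    have heach : ∀ q : Nat,
        pvInner (x :: xs) (2 * q) + pvInner (x :: xs) (2 * q + 1)
          = (1 + x) * pvInner xs q := by
      intro q
      rw [pv_inner_cons, pv_inner_cons]
      have e1 : (2 * q).testBit 0 = false := by simp [Nat.testBit_zero]
      have e2 : (2 * q + 1).testBit 0 = true := by simp [Nat.testBit_zero]
      have e3 : 2 * q / 2 = q := by omega
      have e4 : (2 * q + 1) / 2 = q := by omega
      rw [e1, e2, e3, e4]
      simp only [if_true, if_false, Bool.false_eq_true, one_mul]
      ring
    calc ((List.range (2 ^ xs.length)).map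
            (fun q => pvInner (x :: xs) (2 * q) + pvInner (x :: xs) (2 * q + 1))).sum
        = ((List.range (2 ^ xs.length)).map (fun q => (1 + x) * pvInner xs q)).sum := by
          congr 1; exact List.map_congr_left (fun q _ => heach q)
      _ = (1 + x) * ((List.range (2 ^ xs.length)).map (pvInner xs)).sum := by
          rw [← List.sum_map_mul_left]
      _ = ((x :: xs).map (fun y => 1 + y)).prod := by
          rw [ih, List.map_cons, List.prod_cons]

-- A's port, rewritten as the Nat-indexed sum of pvInner over all masks
theorem pv_foldl_add (l : List Nat) (f : Nat → Int) (a : Int) :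
    l.foldl (fun sm k => sm + f k) a = a + (l.map f).sum := by
  induction l generalizing a with
  | nil => simp
  | cons y t ih => simp [ih, add_assoc]

theorem pv_A_eq (ls : List Int) :
    getSubSeqProdSum ls = ((List.range (2 ^ ls.length)).map (pvInner ls)).sum := by
  unfold getSubSeqProdSum pvInner
  simp only [PySem.List.len_eq]
  rw [PySem.List.pyRange_zero_natCast, PySem.List.pyRange_zero_natCast]
  simp only [List.foldl_map, Int.toNat_natCast, pv_bit, PySem.List.pyGetD_natCast]
  rw [pv_foldl_add, zero_add, Nat.one_shiftLeft]
  congr 1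

theorem pv_B_eq (ls : List Int) :
    getSubSeqProdSum_alt ls = (ls.map (fun x => 1 + x)).prod := by
  unfold getSubSeqProdSum_alt
  rw [List.prod_eq_foldl, List.foldl_map]

-- ===== VERDICT (by name: the statement is the Claim_ definition above) =====
theorem getSubSeqProdSum_spec : Claim_equal_getSubSeqProdSum := by
  intro ls _
  unfold Spec_getSubSeqProdSum
  rw [pv_A_eq, pv_B_eq, pv_sum_inner]
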